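-- pv_equiv track=rewrite | github.com/EvgenyMAI/Study | Численные методы/Решения/lab1/lab1.4.py | sum_off_diagonal_squares
-- ===== SOURCE A (Python) =====
-- def sum_off_diagonal_squares(matrix):
--     """Вычисляет сумму квадратов внедиагональных элементов матрицы."""
--     n = len(matrix)
--     total = 0
--     for i in range(n):
--         for j in range(n):
--             if i != j:
--                 total += matrix[i][j] ** 2
--     return total
-- ===== SOURCE B (Python) =====
-- def sum_off_diagonal_squares(matrix):
--     """Sum of all squared entries minus the squared diagonal: no i != j branch."""
--     n = len(matrix)
--     full = 0
--     for i in range(n):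
--         for j in range(n):
--             full += matrix[i][j] ** 2
--     diag = 0
--     for i in range(n):
--         diag += matrix[i][i] ** 2
--     return full - diag
-- ===== Notes on version B (the rewrite author's own statement) =====
-- stated objective: alternative
-- what changed: Replaces the conditional off-diagonal accumulation (if i != j inside the double loop) by two unconditional passes: the sum of squares of ALL entries minus the sum of squares of the diagonal entries.
-- outside the precondition, e.g. on sum_off_diagonal_squares([[1, 2], [3]]): A returns 13, B raises IndexError
import Mathlib
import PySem

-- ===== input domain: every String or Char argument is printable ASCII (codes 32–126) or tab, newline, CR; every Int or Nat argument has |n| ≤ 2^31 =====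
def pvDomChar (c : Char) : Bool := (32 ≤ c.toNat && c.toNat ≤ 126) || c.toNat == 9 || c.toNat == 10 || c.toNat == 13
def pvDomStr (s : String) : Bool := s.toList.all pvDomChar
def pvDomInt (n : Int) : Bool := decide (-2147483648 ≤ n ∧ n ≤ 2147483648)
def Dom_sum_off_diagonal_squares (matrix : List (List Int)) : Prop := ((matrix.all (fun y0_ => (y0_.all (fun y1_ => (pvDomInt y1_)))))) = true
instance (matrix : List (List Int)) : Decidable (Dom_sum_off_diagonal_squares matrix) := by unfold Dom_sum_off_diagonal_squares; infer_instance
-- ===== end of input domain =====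

-- B computes the sum of squares of ALL entries minus the squared diagonal (two
-- unconditional passes) instead of A's conditional i != j accumulation.

-- ===== PORT A =====
def sum_off_diagonal_squares (matrix : List (List Int)) : Int :=
  let n : Int := matrix.length
  (PySem.List.pyRange 0 n 1).foldl (fun total i =>
    (PySem.List.pyRange 0 n 1).foldl (fun total j =>
      if i ≠ j then total + (PySem.List.pyGetD (PySem.List.pyGetD matrix i []) j 0) ^ 2
      else total) total) 0

-- ===== PORT B =====
def sum_off_diagonal_squares_alt (matrix : List (List Int)) : Int :=
  let n : Int := matrix.length
  let full := (PySem.List.pyRange 0 n 1).foldl (fun full i =>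
    (PySem.List.pyRange 0 n 1).foldl (fun full j =>
      full + (PySem.List.pyGetD (PySem.List.pyGetD matrix i []) j 0) ^ 2) full) 0
  let diag := (PySem.List.pyRange 0 n 1).foldl (fun diag i =>
    diag + (PySem.List.pyGetD (PySem.List.pyGetD matrix i []) i 0) ^ 2) 0
  full - diag

-- ===== PRECONDITION & SPEC =====
-- Pre_ excludes ragged matrices with a row shorter than the row count: A raises
-- IndexError on almost all of them (and on the degenerate ones where only the
-- skipped diagonal index is missing A still returns, but B's full pass raises).
def Pre_sum_off_diagonal_squares (matrix : List (List Int)) : Prop :=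
  ∀ row ∈ matrix, matrix.length ≤ row.length
instance (matrix : List (List Int)) : Decidable (Pre_sum_off_diagonal_squares matrix) := by
  unfold Pre_sum_off_diagonal_squares; infer_instance
def pvWitness_sum_off_diagonal_squares : List (List Int) := [[1, 2], [3, 4]]

def Spec_sum_off_diagonal_squares (matrix : List (List Int)) (out : Int) : Prop :=
  out = sum_off_diagonal_squares_alt matrix
instance (matrix : List (List Int)) (out : Int) : Decidable (Spec_sum_off_diagonal_squares matrix out) := by
  unfold Spec_sum_off_diagonal_squares; infer_instance

-- ===== CLAIM (what is proved, stated in full; the proofs are below) =====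
def Claim_equal_sum_off_diagonal_squares : Prop := ∀ (matrix : List (List Int)), Dom_sum_off_diagonal_squares matrix → Pre_sum_off_diagonal_squares matrix → Spec_sum_off_diagonal_squares matrix (sum_off_diagonal_squares matrix)

-- ===== LEMMAS AND PROOFS =====

theorem pv_foldl_add_sum (f : Int → Int) (L : List Int) (a : Int) :
    L.foldl (fun t x => t + f x) a = a + (L.map f).sum := by
  induction L generalizing a with
  | nil => simp
  | cons x L ih => simp [List.foldl_cons, ih, add_assoc]

theorem pv_sum_ite_not_mem (g : Int → Int) (i : Int) (L : List Int) (hi : i ∉ L) :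
    (L.map (fun j => if i = j then 0 else g j)).sum = (L.map g).sum := by
  induction L with
  | nil => rfl
  | cons x L ih =>
    simp only [List.mem_cons, not_or] at hi
    simp [if_neg hi.1, ih hi.2]

theorem pv_sum_ite_mem (g : Int → Int) (i : Int) (L : List Int)
    (hnd : L.Nodup) (hi : i ∈ L) :
    (L.map (fun j => if i = j then 0 else g j)).sum = (L.map g).sum - g i := by
  induction L with
  | nil => cases hi
  | cons x L ih =>
    rcases List.nodup_cons.mp hnd with ⟨hx, hnd'⟩
    rcases List.mem_cons.mp hi with h | h
    · subst h
      simp [pv_sum_ite_not_mem g i L hx]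
    · have hne : i ≠ x := by rintro rfl; exact hx h
      simp [if_neg hne, ih hnd' h]
      ring

theorem pv_sum_map_sub (f d : Int → Int) (L : List Int) :
    (L.map (fun i => f i - d i)).sum = (L.map f).sum - (L.map d).sum := by
  induction L with
  | nil => rfl
  | cons x L ih => simp [ih]; ring

-- ===== VERDICT (by name: the statement is the Claim_ definition above) =====
theorem sum_off_diagonal_squares_spec : Claim_equal_sum_off_diagonal_squares := by
  intro matrix _ _
  unfold Spec_sum_off_diagonal_squares sum_off_diagonal_squares sum_off_diagonal_squares_alt
  set n : Int := (matrix.length : Int) with hn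
  set L := PySem.List.pyRange 0 n 1 with hL
  set g : Int → Int → Int := fun i j =>
    (PySem.List.pyGetD (PySem.List.pyGetD matrix i []) j 0) ^ 2 with hg
  have hnd : L.Nodup := PySem.List.nodup_pyRange_one 0 n
  -- rewrite A's inner loop body into an unconditional add of an ite
  have hinner : ∀ (i a : Int),
      L.foldl (fun t j => if i ≠ j then t + g i j else t) a
        = a + (L.map (fun j => if i = j then 0 else g i j)).sum := by
    intro i a
    have hfun : (fun t j => if i ≠ j then t + g i j else t)
        = (fun t j => t + (if i = j then 0 else g i j)) := by
      funext t j
      by_cases h : i = j <;> simp [h]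
    rw [hfun, pv_foldl_add_sum]
  have hA : L.foldl (fun total i =>
      L.foldl (fun total j => if i ≠ j then total + g i j else total) total) 0
      = (L.map (fun i => (L.map (fun j => if i = j then 0 else g i j)).sum)).sum := by
    have := pv_foldl_add_sum (fun i => (L.map (fun j => if i = j then 0 else g i j)).sum) L 0
    rw [zero_add] at this
    rw [← this]
    apply PySem.List.foldl_congr_mem
    intro t i _
    exact hinner i t
  have hfull : L.foldl (fun full i => L.foldl (fun full j => full + g i j) full) 0
      = (L.map (fun i => (L.map (g i)).sum)).sum := by
    have := pv_foldl_add_sum (fun i => (L.map (g i)).sum) L 0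
    rw [zero_add] at this
    rw [← this]
    apply PySem.List.foldl_congr_mem
    intro t i _
    exact pv_foldl_add_sum (g i) L t
  have hdiag : L.foldl (fun diag i => diag + g i i) 0 = (L.map (fun i => g i i)).sum := by
    have := pv_foldl_add_sum (fun i => g i i) L 0
    rw [zero_add] at this
    exact this
  show L.foldl _ 0 = L.foldl _ 0 - L.foldl _ 0
  rw [hA, hfull, hdiag, ← pv_sum_map_sub]
  refine congrArg List.sum (List.map_congr_left ?_)
  intro i hiL
  exact pv_sum_ite_mem (g i) i L hnd hiL
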